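-- pv_equiv track=rewrite | github.com/Shtrikh17/Calc-Info-Content | information_content.py | accum_calc
-- ===== SOURCE A (Python) =====
-- def accum_calc(class_1, class_2, gradations_list):
--
--     gradations_first = list()
--     gradations_second = list()
--
--     for i in range(len(gradations_list)):
--         tmp = 0
--         for x in class_1:
--             if x == gradations_list[i]:
--                 tmp += 1
--         gradations_first.append(tmp)
--         tmp = 0
--         for x in class_2:
--             if x == gradations_list[i]:
--                 tmp += 1
--         gradations_second.append(tmp)
--
--     acc_freq_1 = list()
--     acc_freq_2 = list()
--
--     for i in range(len(gradations_list)):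
--         if i == 0:
--             acc_freq_1.append(gradations_first[i])
--             acc_freq_2.append(gradations_second[i])
--         else:
--             acc_freq_1.append(acc_freq_1[len(acc_freq_1)-1]+gradations_first[i])
--             acc_freq_2.append(acc_freq_2[len(acc_freq_2) - 1] + gradations_second[i])
--
--     max_diff = 0
--     for i in range(len(gradations_list)):
--         tmp = abs(acc_freq_1[i] - acc_freq_2[i])
--         if tmp > max_diff:
--             max_diff = tmp
--
--     return max_diff
-- ===== SOURCE B (Python) =====
-- def accum_calc(class_1, class_2, gradations_list):
--     # One pass per class to tally counts, then one pass over gradations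
--     # maintaining the running cumulative-frequency difference.
--     c1 = {}
--     for x in class_1:
--         c1[x] = c1.get(x, 0) + 1
--     c2 = {}
--     for x in class_2:
--         c2[x] = c2.get(x, 0) + 1
--     diff = 0
--     best = 0
--     for g in gradations_list:
--         diff += c1.get(g, 0) - c2.get(g, 0)
--         best = max(best, abs(diff))
--     return best
-- ===== Notes on version B (the rewrite author's own statement) =====
-- stated objective: faster
-- what changed: Replaces the per-gradation rescans of both classes and the two intermediate cumulative lists by dict tallies built once plus a single running-sum/maximum pass over the gradations.
import Mathlib
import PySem

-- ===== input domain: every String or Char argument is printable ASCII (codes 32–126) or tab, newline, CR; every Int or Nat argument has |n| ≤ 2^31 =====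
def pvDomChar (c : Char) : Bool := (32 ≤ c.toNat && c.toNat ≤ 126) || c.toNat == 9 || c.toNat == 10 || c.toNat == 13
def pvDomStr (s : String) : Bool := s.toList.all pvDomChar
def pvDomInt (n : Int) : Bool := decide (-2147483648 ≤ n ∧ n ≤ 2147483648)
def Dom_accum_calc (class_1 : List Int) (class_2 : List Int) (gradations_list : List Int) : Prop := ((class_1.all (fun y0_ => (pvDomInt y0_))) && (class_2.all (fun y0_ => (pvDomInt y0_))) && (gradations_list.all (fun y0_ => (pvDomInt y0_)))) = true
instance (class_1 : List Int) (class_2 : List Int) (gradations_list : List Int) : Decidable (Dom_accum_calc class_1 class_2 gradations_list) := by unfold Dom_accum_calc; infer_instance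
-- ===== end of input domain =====

-- B tallies each class's counts in one dict pass and keeps a running cumulative
-- difference, replacing A's per-gradation rescans of both classes (objective: faster).

-- ===== PORT A =====
def accum_calc (class_1 : List Int) (class_2 : List Int) (gradations_list : List Int) : Int :=
  let p := (List.range gradations_list.length).foldl
    (fun (p : List Int × List Int) i =>
      (p.1 ++ [class_1.foldl (fun tmp x => if x == gradations_list.getD i 0 then tmp + 1 else tmp) 0],
       p.2 ++ [class_2.foldl (fun tmp x => if x == gradations_list.getD i 0 then tmp + 1 else tmp) 0]))
    ([], [])
  let gradations_first := p.1
  let gradations_second := p.2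
  let q := (List.range gradations_list.length).foldl
    (fun (q : List Int × List Int) i =>
      if i = 0 then
        (q.1 ++ [gradations_first.getD i 0], q.2 ++ [gradations_second.getD i 0])
      else
        (q.1 ++ [q.1.getD (q.1.length - 1) 0 + gradations_first.getD i 0],
         q.2 ++ [q.2.getD (q.2.length - 1) 0 + gradations_second.getD i 0]))
    ([], [])
  let acc_freq_1 := q.1
  let acc_freq_2 := q.2
  (List.range gradations_list.length).foldl
    (fun md i =>
      let tmp := |acc_freq_1.getD i 0 - acc_freq_2.getD i 0|
      if md < tmp then tmp else md) 0

-- ===== PORT B =====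
def accum_calc_alt (class_1 : List Int) (class_2 : List Int) (gradations_list : List Int) : Int :=
  let c1 := class_1.foldl (fun d x => d.insert x (d.getD x 0 + 1)) (PySem.Dict.empty : PySem.Dict Int Int)
  let c2 := class_2.foldl (fun d x => d.insert x (d.getD x 0 + 1)) (PySem.Dict.empty : PySem.Dict Int Int)
  let r := gradations_list.foldl
    (fun (s : Int × Int) g =>
      let diff := s.1 + (c1.getD g 0 - c2.getD g 0)
      (diff, max s.2 |diff|)) (0, 0)
  r.2

-- ===== PRECONDITION & SPEC =====
def Spec_accum_calc (class_1 : List Int) (class_2 : List Int) (gradations_list : List Int) (out : Int) : Prop := out = accum_calc_alt class_1 class_2 gradations_list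
instance (class_1 : List Int) (class_2 : List Int) (gradations_list : List Int) (out : Int) : Decidable (Spec_accum_calc class_1 class_2 gradations_list out) := by unfold Spec_accum_calc; infer_instance

-- ===== CLAIM (what is proved, stated in full; the proofs are below) =====
def Claim_equal_accum_calc : Prop := ∀ (class_1 : List Int) (class_2 : List Int) (gradations_list : List Int), Dom_accum_calc class_1 class_2 gradations_list → Spec_accum_calc class_1 class_2 gradations_list (accum_calc class_1 class_2 gradations_list)

-- ===== LEMMAS AND PROOFS =====

-- prefix sums starting from a running value r (the shape of A's second loop)
def pvScan (r : Int) : List Int → List Int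
  | [] => []
  | x :: xs => (r + x) :: pvScan (r + x) xs

theorem pvScan_length (r : Int) (l : List Int) : (pvScan r l).length = l.length := by
  induction l generalizing r with
  | nil => rfl
  | cons x xs ih => simp [pvScan, ih]

theorem pv_foldl_range_getD {α β : Type} (l : List β) (d : β) (f : α → β → α) (a : α) :
    (List.range l.length).foldl (fun acc i => f acc (l.getD i d)) a = l.foldl f a := by
  induction l generalizing a with
  | nil => rfl
  | cons x xs ih =>
    simp only [List.length_cons, List.range_succ_eq_map, List.foldl_cons, List.foldl_map,
      List.getD_cons_zero, List.getD_cons_succ]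
    exact ih (f a x)

theorem pv_lastD_append (a : List Int) (x : Int) :
    (a ++ [x]).getD ((a ++ [x]).length - 1) 0 = x := by
  simp

theorem pv_loop2_tail : ∀ (F G a b : List Int), G.length = F.length → a ≠ [] → b ≠ [] →
    (List.range F.length).foldl
      (fun (q : List Int × List Int) i =>
        (q.1 ++ [q.1.getD (q.1.length - 1) 0 + F.getD i 0],
         q.2 ++ [q.2.getD (q.2.length - 1) 0 + G.getD i 0])) (a, b)
    = (a ++ pvScan (a.getD (a.length - 1) 0) F, b ++ pvScan (b.getD (b.length - 1) 0) G) := by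
  intro F
  induction F with
  | nil => intro G a b hG _ _; cases G <;> simp_all [pvScan]
  | cons f F' ih =>
    intro G a b hG ha hb
    cases G with
    | nil => simp at hG
    | cons g G' =>
      simp only [List.length_cons, List.range_succ_eq_map, List.foldl_cons, List.foldl_map,
        List.getD_cons_zero, List.getD_cons_succ]
      have h := ih G' (a ++ [a.getD (a.length - 1) 0 + f]) (b ++ [b.getD (b.length - 1) 0 + g])
        (by simpa using hG) (by simp) (by simp)
      rw [pv_lastD_append, pv_lastD_append] at h
      rw [h]
      simp [pvScan, List.append_assoc]

theorem pv_loop2 (F G : List Int) (hG : G.length = F.length) :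
    (List.range F.length).foldl
      (fun (q : List Int × List Int) i =>
        if i = 0 then (q.1 ++ [F.getD i 0], q.2 ++ [G.getD i 0])
        else (q.1 ++ [q.1.getD (q.1.length - 1) 0 + F.getD i 0],
              q.2 ++ [q.2.getD (q.2.length - 1) 0 + G.getD i 0])) ([], [])
    = (pvScan 0 F, pvScan 0 G) := by
  cases F with
  | nil => cases G <;> simp_all [pvScan]
  | cons f F' =>
    cases G with
    | nil => simp at hG
    | cons g G' =>
      simp only [List.length_cons, List.range_succ_eq_map, List.foldl_cons, List.foldl_map,
        List.getD_cons_zero, List.getD_cons_succ, if_true, List.nil_append,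
        Nat.succ_ne_zero, if_false]
      have h := pv_loop2_tail F' G' [f] [g] (by simpa using hG) (by simp) (by simp)
      simp only [List.length_cons, List.length_nil] at h
      rw [h]
      simp [pvScan]

theorem pv_loop3 : ∀ (u v : List Int), v.length = u.length → ∀ (m : Int),
    (List.range u.length).foldl
      (fun md i =>
        let tmp := |u.getD i 0 - v.getD i 0|
        if md < tmp then tmp else md) m
    = (u.zip v).foldl (fun md p => if md < |p.1 - p.2| then |p.1 - p.2| else md) m := by
  intro u
  induction u with
  | nil => intro v hv m; cases v <;> simp_all
  | cons x xs ih =>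
    intro v hv m
    cases v with
    | nil => simp at hv
    | cons y ys =>
      simp only [List.length_cons, List.range_succ_eq_map, List.foldl_cons, List.foldl_map,
        List.getD_cons_zero, List.getD_cons_succ, List.zip_cons_cons]
      exact ih ys (by simpa using hv) _

theorem pv_int_max (m t : Int) : max m t = if m < t then t else m := by omega

theorem pv_main : ∀ (F G : List Int), G.length = F.length → ∀ (r1 r2 m : Int),
    ((pvScan r1 F).zip (pvScan r2 G)).foldl
      (fun md p => if md < |p.1 - p.2| then |p.1 - p.2| else md) m
    = ((F.zip G).foldl
        (fun (s : Int × Int) p =>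
          (s.1 + (p.1 - p.2), max s.2 |s.1 + (p.1 - p.2)|)) (r1 - r2, m)).2 := by
  intro F
  induction F with
  | nil => intro G h r1 r2 m; cases G <;> simp_all [pvScan]
  | cons f F' ih =>
    intro G h r1 r2 m
    cases G with
    | nil => simp at h
    | cons g G' =>
      simp only [pvScan, List.zip_cons_cons, List.foldl_cons]
      have e1 : r1 - r2 + (f - g) = r1 + f - (r2 + g) := by ring
      rw [e1, pv_int_max]
      exact ih G' (by simpa using h) (r1 + f) (r2 + g) _

theorem pv_count_fold (cls : List Int) (v : Int) :
    cls.foldl (fun tmp x => if x == v then tmp + 1 else tmp) 0 = (cls.count v : Int) := by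
  rw [PySem.List.foldl_beq_add_one]
  simp

theorem pv_dict_count (cls : List Int) (v : Int) :
    (cls.foldl (fun d x => d.insert x (d.getD x 0 + 1)) (PySem.Dict.empty : PySem.Dict Int Int)).getD v 0
      = (cls.count v : Int) := by
  rw [PySem.Dict.getD_foldl_insert_add_one]
  simp

theorem pv_count_fold' (cls : List Int) (v : Int) :
    cls.foldl (fun tmp x => if x = v then tmp + 1 else tmp) 0 = (cls.count v : Int) := by
  have h := pv_count_fold cls v
  simpa using h

-- ===== VERDICT (by name: the statement is the Claim_ definition above) =====
theorem accum_calc_spec : Claim_equal_accum_calc := by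
  intro class_1 class_2 g _
  unfold Spec_accum_calc accum_calc accum_calc_alt
  simp only []
  -- name the count functions
  set f1 : Int → Int := fun v => (class_1.count v : Int) with hf1
  set f2 : Int → Int := fun v => (class_2.count v : Int) with hf2
  -- A side, loop 1: counts per gradation
  have l1 : (List.range g.length).foldl
      (fun (p : List Int × List Int) i =>
        (p.1 ++ [class_1.foldl (fun tmp x => if x == g.getD i 0 then tmp + 1 else tmp) 0],
         p.2 ++ [class_2.foldl (fun tmp x => if x == g.getD i 0 then tmp + 1 else tmp) 0]))
      ([], []) = (g.map f1, g.map f2) := by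
    rw [pv_foldl_range_getD g 0
      (f := fun (p : List Int × List Int) (v : Int) =>
        (p.1 ++ [class_1.foldl (fun tmp x => if x == v then tmp + 1 else tmp) 0],
         p.2 ++ [class_2.foldl (fun tmp x => if x == v then tmp + 1 else tmp) 0]))]
    rw [PySem.List.foldl_prod_mk
      (f := fun acc (v : Int) => acc ++ [class_1.foldl (fun tmp x => if x == v then tmp + 1 else tmp) 0])
      (g := fun acc (v : Int) => acc ++ [class_2.foldl (fun tmp x => if x == v then tmp + 1 else tmp) 0])]
    rw [PySem.List.foldl_append_singleton_eq_map, PySem.List.foldl_append_singleton_eq_map]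
    simp [hf1, hf2, pv_count_fold']
  rw [l1]
  -- A side, loop 2: cumulative sums
  have hlen2 : (g.map f2).length = (g.map f1).length := by simp
  have hlen1 : g.length = (g.map f1).length := by simp
  rw [hlen1, pv_loop2 (g.map f1) (g.map f2) hlen2]
  simp only []
  -- A side, loop 3
  have hlen3 : (pvScan 0 (g.map f2)).length = (pvScan 0 (g.map f1)).length := by
    simp [pvScan_length]
  have hlen4 : (g.map f1).length = (pvScan 0 (g.map f1)).length := by simp [pvScan_length]
  rw [hlen4, pv_loop3 _ _ hlen3]
  rw [pv_main (g.map f1) (g.map f2) hlen2 0 0 0]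
  -- B side
  have hb : (g.foldl
      (fun (s : Int × Int) v =>
        (s.1 + ((class_1.foldl (fun d x => d.insert x (d.getD x 0 + 1)) (PySem.Dict.empty : PySem.Dict Int Int)).getD v 0
              - (class_2.foldl (fun d x => d.insert x (d.getD x 0 + 1)) (PySem.Dict.empty : PySem.Dict Int Int)).getD v 0),
         max s.2 |s.1 + ((class_1.foldl (fun d x => d.insert x (d.getD x 0 + 1)) (PySem.Dict.empty : PySem.Dict Int Int)).getD v 0
              - (class_2.foldl (fun d x => d.insert x (d.getD x 0 + 1)) (PySem.Dict.empty : PySem.Dict Int Int)).getD v 0)|))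
      (0, 0))
      = ((g.map f1).zip (g.map f2)).foldl
          (fun (s : Int × Int) p => (s.1 + (p.1 - p.2), max s.2 |s.1 + (p.1 - p.2)|)) (0 - 0, 0) := by
    rw [List.zip_map']
    rw [List.foldl_map]
    simp only [pv_dict_count, hf1, hf2, Int.sub_zero]
  rw [hb]
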